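-- pv_equiv track=rewrite | github.com/shekhartata/querySmith | querysmith/pipeline_parse.py | _path_exists_in_schema
-- ===== SOURCE A (Python) =====
-- def _path_exists_in_schema(path: str, schema_paths: set[str]) -> bool:
--     if path in schema_paths:
--         return True
--     for k in schema_paths:
--         if k.startswith(path + "."):
--             return True
--     parts = path.split(".")
--     for i in range(len(parts) - 1):
--         parent = ".".join(parts[: i + 1])
--         if parent in schema_paths:
--             return True
--     return False
-- ===== SOURCE B (Python) =====
-- def _path_exists_in_schema(path: str, schema_paths: set) -> bool:
--     dotted = path + "."
--     for k in schema_paths: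
--         if k == path or k.startswith(dotted) or path.startswith(k + "."):
--             return True
--     return False
-- ===== Notes on version B (the rewrite author's own statement) =====
-- stated objective: simpler
-- what changed: B replaces A's three separate passes (direct membership, descendant scan, and a generate-each-ancestor-via-split/join-and-test loop) with a single loop over schema_paths testing k == path, k.startswith(path+'.') or path.startswith(k+'.'); the split/join ancestor enumeration disappears.
import Mathlib
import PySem

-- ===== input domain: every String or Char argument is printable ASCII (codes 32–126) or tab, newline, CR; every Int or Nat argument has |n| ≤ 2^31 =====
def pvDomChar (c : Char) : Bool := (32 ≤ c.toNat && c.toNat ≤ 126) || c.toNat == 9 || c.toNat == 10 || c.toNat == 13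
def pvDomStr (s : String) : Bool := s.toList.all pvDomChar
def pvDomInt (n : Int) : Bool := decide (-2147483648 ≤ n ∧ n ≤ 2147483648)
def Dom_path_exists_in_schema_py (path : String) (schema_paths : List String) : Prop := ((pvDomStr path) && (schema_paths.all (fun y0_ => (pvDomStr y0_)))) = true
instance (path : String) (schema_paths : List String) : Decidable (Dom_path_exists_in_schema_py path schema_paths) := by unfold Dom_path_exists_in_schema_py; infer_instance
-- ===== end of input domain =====

-- B folds A's three passes (membership, descendant scan, split/join ancestor loop) into one
-- loop testing k == path, k.startswith(path+"."), path.startswith(k+".") — simpler, same results.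


-- ===== PORT A =====
-- literal transliteration of A: direct membership, then the descendant scan
-- (first for-loop, early return = any), then the ancestor loop over range(len(parts)-1).
def path_exists_in_schema_py (path : String) (schema_paths : List String) : Bool :=
  if (schema_paths.map String.toList).contains path.toList then true
  else if (schema_paths.map String.toList).any
      (fun k => PySem.Chars.startswith k (path.toList ++ ['.'])) then true
  else
    (PySem.List.pyRange 0 (((PySem.Chars.splitOn path.toList ['.']).length : Int) - 1) 1).any
      (fun i => (schema_paths.map String.toList).contains
        (PySem.Chars.join ['.']
          (PySem.List.slice (PySem.Chars.splitOn path.toList ['.']) none (some (i + 1)))))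

-- ===== PORT B =====
-- transliteration of Source B: a single loop over schema_paths, early return = any.
def path_exists_in_schema_py_alt (path : String) (schema_paths : List String) : Bool :=
  let dotted := path.toList ++ ['.']
  schema_paths.any (fun k =>
    k.toList == path.toList || PySem.Chars.startswith k.toList dotted
      || PySem.Chars.startswith path.toList (k.toList ++ ['.']))

-- ===== PRECONDITION & SPEC =====
def Spec_path_exists_in_schema_py (path : String) (schema_paths : List String) (out : Bool) : Prop := out = path_exists_in_schema_py_alt path schema_paths
instance (path : String) (schema_paths : List String) (out : Bool) : Decidable (Spec_path_exists_in_schema_py path schema_paths out) := by unfold Spec_path_exists_in_schema_py; infer_instance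

-- ===== CLAIM (what is proved, stated in full; the proofs are below) =====
def Claim_equal_path_exists_in_schema_py : Prop := ∀ (path : String) (schema_paths : List String), Dom_path_exists_in_schema_py path schema_paths → Spec_path_exists_in_schema_py path schema_paths (path_exists_in_schema_py path schema_paths)

-- ===== LEMMAS AND PROOFS =====

lemma pv_splitOn_dot_cons (rest : List Char) :
    List.splitOn '.' ('.'::rest) = [] :: List.splitOn '.' rest := by
  simp [List.splitOn, List.splitOnP_cons]

lemma pv_splitOn_other_cons (c : Char) (rest : List Char) (h : c ≠ '.') :
    List.splitOn '.' (c::rest) = List.modifyHead (List.cons c) (List.splitOn '.' rest) := by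
  simp [List.splitOn, List.splitOnP_cons, h]

lemma pv_splitOn_ne_nil (l : List Char) : l.splitOn '.' ≠ [] := by
  simp [List.splitOn, List.splitOnP_ne_nil]

-- PySem's fuel-based splitOn on the one-char separator is List.splitOn
lemma pv_go_eq (fuel : Nat) : ∀ (l cur : List Char) (acc : List (List Char)), l.length ≤ fuel →
    PySem.Chars.splitOn.go ['.'] fuel l cur acc =
      acc.reverse ++ (cur.reverse ++ (l.splitOn '.').headI) :: (l.splitOn '.').tail := by
  induction fuel with
  | zero =>
    intro l cur acc h
    have hl : l = [] := by cases l <;> simp_all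
    subst hl
    rw [PySem.Chars.splitOn.go.eq_def]
    simp [List.splitOn_nil]
  | succ fuel ih =>
    intro l cur acc h
    cases l with
    | nil =>
      rw [PySem.Chars.splitOn.go.eq_def]
      simp [List.splitOn_nil]
    | cons c rest =>
      rw [PySem.Chars.splitOn.go.eq_def]
      by_cases hc : c = '.'
      · subst hc
        simp only [List.isPrefixOf, BEq.rfl, Bool.true_and, if_pos,
          List.length_cons, List.drop_succ_cons, List.length_nil, List.drop_zero]
        rw [ih rest [] _ (by simpa using h)]
        rw [pv_splitOn_dot_cons]
        rcases hsp : rest.splitOn '.' with _ | ⟨h0, t0⟩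
        · exact absurd hsp (pv_splitOn_ne_nil rest)
        · simp
      · have hpre : (['.'].isPrefixOf (c :: rest)) = false := by
          simp [List.isPrefixOf]
          intro hcc
          exact absurd hcc.symm hc
        simp only [hpre, if_neg, Bool.false_eq_true, not_false_eq_true]
        rw [ih rest (c :: cur) acc (by simpa using h)]
        rw [pv_splitOn_other_cons c rest hc]
        rcases hsp : rest.splitOn '.' with _ | ⟨h0, t0⟩
        · exact absurd hsp (pv_splitOn_ne_nil rest)
        · simp

lemma pv_splitOn_eq (l : List Char) :
    PySem.Chars.splitOn l ['.'] = l.splitOn '.' := by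
  unfold PySem.Chars.splitOn
  rw [pv_go_eq (l.length + 1) l [] [] (by omega)]
  rcases hsp : l.splitOn '.' with _ | ⟨h0, t0⟩
  · exact absurd hsp (pv_splitOn_ne_nil l)
  · simp

lemma pv_intercalate_singleton (x : List Char) : List.intercalate ['.'] [x] = x := by
  simp [List.intercalate]

lemma pv_intercalate_cons_head (c : Char) (h : List Char) (xs : List (List Char)) :
    List.intercalate ['.'] ((c::h)::xs) = c :: List.intercalate ['.'] (h::xs) := by
  cases xs with
  | nil => simp [pv_intercalate_singleton]
  | cons y ys =>
    rw [show List.intercalate ['.'] ((c::h)::y::ys) = PySem.Chars.join ['.'] ((c::h)::y::ys) from rfl,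
        PySem.Chars.join_cons_cons,
        show List.intercalate ['.'] (h::y::ys) = PySem.Chars.join ['.'] (h::y::ys) from rfl,
        PySem.Chars.join_cons_cons]
    simp

lemma pv_intercalate_nil_cons (h : List Char) (t : List (List Char)) :
    List.intercalate ['.'] ([]::h::t) = '.' :: List.intercalate ['.'] (h::t) := by
  rw [show List.intercalate ['.'] (([] : List Char)::h::t) = PySem.Chars.join ['.'] ([]::h::t) from rfl,
      PySem.Chars.join_cons_cons]
  simp [PySem.Chars.join]

-- ancestor characterization: k ++ "." is a prefix of p  iff  k is the join of the
-- first j parts of p.split(".") for some 1 ≤ j < len(parts)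
lemma pv_anc_iff (p : List Char) : ∀ (k : List Char),
    ((k ++ ['.']) <+: p) ↔
      ∃ j : Nat, 1 ≤ j ∧ j < (p.splitOn '.').length ∧
        k = List.intercalate ['.'] ((p.splitOn '.').take j) := by
  induction p with
  | nil =>
    intro k
    constructor
    · intro hpre
      have := List.eq_nil_of_prefix_nil hpre
      simp at this
    · rintro ⟨j, hj1, hj2, -⟩
      rw [List.splitOn_nil] at hj2
      simp at hj2
      omega
  | cons c rest ih =>
    intro k
    by_cases hc : c = '.'
    · subst hc
      rw [pv_splitOn_dot_cons]
      rcases hq : rest.splitOn '.' with _ | ⟨h0, t0⟩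
      · exact absurd hq (pv_splitOn_ne_nil rest)
      cases k with
      | nil =>
        simp only [List.nil_append, List.cons_prefix_cons, List.nil_prefix, and_true, true_iff]
        exact ⟨1, le_refl 1, by simp, by simp [pv_intercalate_singleton]⟩
      | cons x k' =>
        simp only [List.cons_append, List.cons_prefix_cons]
        constructor
        · rintro ⟨rfl, hpre⟩
          obtain ⟨j', hj1, hj2, hk⟩ := (ih k').mp hpre
          rw [hq] at hj2 hk
          refine ⟨j' + 1, by omega, by simp only [List.length_cons] at hj2 ⊢; omega, ?_⟩
          obtain ⟨j'', rfl⟩ : ∃ j'', j' = j'' + 1 := ⟨j' - 1, by omega⟩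
          rw [List.take_succ_cons, List.take_succ_cons, pv_intercalate_nil_cons]
          rw [List.take_succ_cons] at hk
          rw [← hk]
        · rintro ⟨j, hj1, hj2, hk⟩
          obtain ⟨j', rfl⟩ : ∃ j', j = j' + 1 := ⟨j - 1, by omega⟩
          rcases Nat.eq_zero_or_pos j' with rfl | hj'
          · rw [List.take_succ_cons, List.take_zero, pv_intercalate_singleton] at hk
            simp at hk
          · obtain ⟨j'', rfl⟩ : ∃ j'', j' = j'' + 1 := ⟨j' - 1, by omega⟩
            rw [List.take_succ_cons, List.take_succ_cons, pv_intercalate_nil_cons] at hk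
            obtain ⟨rfl, hk'⟩ := List.cons_eq_cons.mp hk
            refine ⟨rfl, (ih k').mpr ⟨j'' + 1, by omega, ?_, ?_⟩⟩
            · rw [hq]; simp only [List.length_cons] at hj2 ⊢; omega
            · rw [hq, List.take_succ_cons, hk']
    · rw [pv_splitOn_other_cons c rest hc]
      rcases hq : rest.splitOn '.' with _ | ⟨h0, t0⟩
      · exact absurd hq (pv_splitOn_ne_nil rest)
      simp only [List.modifyHead]
      cases k with
      | nil =>
        simp only [List.nil_append, List.cons_prefix_cons]
        constructor
        · rintro ⟨rfl, -⟩; exact absurd rfl hc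
        · rintro ⟨j, hj1, hj2, hk⟩
          obtain ⟨j', rfl⟩ : ∃ j', j = j' + 1 := ⟨j - 1, by omega⟩
          rw [List.take_succ_cons, pv_intercalate_cons_head] at hk
          simp at hk
      | cons x k' =>
        simp only [List.cons_append, List.cons_prefix_cons]
        constructor
        · rintro ⟨rfl, hpre⟩
          obtain ⟨j', hj1, hj2, hk⟩ := (ih k').mp hpre
          rw [hq] at hj2 hk
          refine ⟨j', hj1, by simpa using hj2, ?_⟩
          obtain ⟨j'', rfl⟩ : ∃ j'', j' = j'' + 1 := ⟨j' - 1, by omega⟩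
          rw [List.take_succ_cons, pv_intercalate_cons_head]
          rw [List.take_succ_cons] at hk
          rw [hk]
        · rintro ⟨j, hj1, hj2, hk⟩
          obtain ⟨j', rfl⟩ : ∃ j', j = j' + 1 := ⟨j - 1, by omega⟩
          rw [List.take_succ_cons, pv_intercalate_cons_head] at hk
          obtain ⟨rfl, hk'⟩ := List.cons_eq_cons.mp hk
          refine ⟨rfl, (ih k').mpr ⟨j' + 1, by omega, ?_, ?_⟩⟩
          · rw [hq]; simpa using hj2
          · rw [hq, List.take_succ_cons, hk']

-- A's ancestor loop succeeds iff some schema path, extended by a dot, is a prefix of p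
lemma pv_loop_iff (p : List Char) (sp : List (List Char)) :
    ((PySem.List.pyRange 0 (((PySem.Chars.splitOn p ['.']).length : Int) - 1) 1).any
        (fun i => sp.contains
          (PySem.Chars.join ['.'] (PySem.List.slice (PySem.Chars.splitOn p ['.']) none (some (i + 1))))) = true)
      ↔ ∃ k ∈ sp, (k ++ ['.']) <+: p := by
  rw [pv_splitOn_eq, List.any_eq_true]
  constructor
  · rintro ⟨i, hi, hc⟩
    rw [PySem.List.mem_pyRange_one] at hi
    rw [PySem.List.slice_to _ (by omega)] at hc
    rw [List.contains_iff_mem] at hc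
    refine ⟨_, hc, ?_⟩
    rw [pv_anc_iff]
    exact ⟨(i + 1).toNat, by omega, by omega, rfl⟩
  · rintro ⟨k, hk, hpre⟩
    rw [pv_anc_iff] at hpre
    obtain ⟨j, hj1, hj2, rfl⟩ := hpre
    refine ⟨(j : Int) - 1, ?_, ?_⟩
    · rw [PySem.List.mem_pyRange_one]; omega
    · rw [PySem.List.slice_to _ (by omega)]
      rw [List.contains_iff_mem]
      have : ((j : Int) - 1 + 1).toNat = j := by omega
      rw [this]
      exact hk

theorem path_exists_in_schema_py_spec : Claim_equal_path_exists_in_schema_py := by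
  intro path S _
  unfold Spec_path_exists_in_schema_py
  have haltE : ∀ s : String, s ∈ S →
      (s.toList = path.toList ∨ (path.toList ++ ['.']) <+: s.toList ∨ (s.toList ++ ['.']) <+: path.toList) →
      path_exists_in_schema_py_alt path S = true := by
    intro s hs hcase
    unfold path_exists_in_schema_py_alt
    rw [List.any_eq_true]
    refine ⟨s, hs, ?_⟩
    rcases hcase with h | h | h
    · simp [h]
    · simp [PySem.Chars.startswith_iff, h]
    · simp [PySem.Chars.startswith_iff, h]
  unfold path_exists_in_schema_py
  split_ifs with h1 h2
  · -- direct membership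
    rw [List.contains_iff_mem, List.mem_map] at h1
    obtain ⟨s, hs, hsl⟩ := h1
    exact (haltE s hs (Or.inl hsl)).symm
  · -- descendant exists
    rw [List.any_eq_true] at h2
    obtain ⟨k, hk, hpre⟩ := h2
    rw [List.mem_map] at hk
    obtain ⟨s, hs, rfl⟩ := hk
    rw [PySem.Chars.startswith_iff] at hpre
    exact (haltE s hs (Or.inr (Or.inl hpre))).symm
  · -- neither: the ancestor loop against B's single pass
    rw [Bool.eq_iff_iff, pv_loop_iff]
    constructor
    · rintro ⟨k, hk, hpre⟩
      rw [List.mem_map] at hk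
      obtain ⟨s, hs, rfl⟩ := hk
      exact haltE s hs (Or.inr (Or.inr hpre))
    · intro hb
      unfold path_exists_in_schema_py_alt at hb
      rw [List.any_eq_true] at hb
      obtain ⟨s, hs, hcase⟩ := hb
      simp only [Bool.or_eq_true, beq_iff_eq, PySem.Chars.startswith_iff] at hcase
      rcases hcase with (h | h) | h
      · exact absurd (by rw [List.contains_iff_mem, List.mem_map]; exact ⟨s, hs, h⟩) h1
      · refine absurd ?_ h2
        rw [List.any_eq_true]
        exact ⟨s.toList, List.mem_map_of_mem hs, by rw [PySem.Chars.startswith_iff]; exact h⟩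
      · exact ⟨s.toList, List.mem_map_of_mem hs, h⟩
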